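-- pv_equiv track=rewrite | github.com/GustavoCayres/KiReDyMo | source/modules/database.py | convert_genes_to_regions
-- ===== SOURCE A (Python) =====
-- def convert_genes_to_regions(genes):
--     """ Converts a list of genes to a list of polycistronic regions. """
--
--     genes.sort(key=lambda x: x[0])
--     genes.append((None, None, None, None, None, None))  # stop gene
--     regions = []
--
--     previous_gene = genes[0]
--     region_start = previous_gene[0]
--     region_end = previous_gene[1]
--     for gene in genes[1:]:
--         if previous_gene[-1] != gene[-1]:  # different polycistronic region
--             start = region_start
--             end = region_end
--             speed = previous_gene[2]
--             delay = previous_gene[3]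
--             chromosome_code = previous_gene[4]
--             chromosome_organism = previous_gene[5]
--             if previous_gene[-1] == "(-)":
--                 start, end = region_end, region_start
--             regions.append((start, end, speed, delay, chromosome_code, chromosome_organism))
--             region_start = gene[0]
--
--         region_end = gene[1]  # update region's end
--         previous_gene = gene
--
--     return regions
-- ===== SOURCE B (Python) =====
-- def convert_genes_to_regions(genes):
--     """Converts a list of genes to a list of polycistronic regions.
--     (Sorts `genes` in place like A, but does not append A's sentinel tuple.)
--
--     Staged computation: first compute the cut indices where the last component
--     changes between neighbours of the sorted list, then build each region
--     directly from the genes at the two ends of each [cut, next cut) span."""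
--     genes.sort(key=lambda x: x[0])
--     if not genes:
--         return []
--     n = len(genes)
--     cuts = [0] + [i for i in range(1, n) if genes[i][-1] != genes[i - 1][-1]] + [n]
--     regions = []
--     for b, e in zip(cuts, cuts[1:]):
--         first, last = genes[b], genes[e - 1]
--         start, end = (last[1], first[0]) if first[-1] == "(-)" else (first[0], last[1])
--         regions.append((start, end, last[2], last[3], last[4], last[5]))
--     return regions
-- ===== Notes on version B (the rewrite author's own statement) =====
-- stated objective: simpler
-- what changed: B replaces A's sentinel-append plus running previous_gene/region_start/region_end single pass by two staged passes: a comprehension first computes the list of cut indices where the last component changes between sorted neighbours, then each region is read off directly from the genes at the two ends of each consecutive cut pair - no sentinel tuple and no running state exist.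
import Mathlib
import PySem

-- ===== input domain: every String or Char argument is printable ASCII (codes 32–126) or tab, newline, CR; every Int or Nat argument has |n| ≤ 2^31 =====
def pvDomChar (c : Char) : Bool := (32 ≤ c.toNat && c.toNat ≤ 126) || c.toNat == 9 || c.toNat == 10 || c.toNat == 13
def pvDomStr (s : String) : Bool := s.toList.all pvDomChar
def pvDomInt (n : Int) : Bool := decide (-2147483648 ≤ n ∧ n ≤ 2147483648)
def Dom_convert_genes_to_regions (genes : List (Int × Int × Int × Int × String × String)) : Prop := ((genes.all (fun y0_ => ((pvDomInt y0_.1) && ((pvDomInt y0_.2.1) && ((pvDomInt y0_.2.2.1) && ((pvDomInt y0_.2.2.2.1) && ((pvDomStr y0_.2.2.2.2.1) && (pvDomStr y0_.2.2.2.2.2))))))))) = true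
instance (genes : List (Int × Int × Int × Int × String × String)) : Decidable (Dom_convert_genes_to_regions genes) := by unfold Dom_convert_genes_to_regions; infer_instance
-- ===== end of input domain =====

-- B replaces A's sentinel append + running previous_gene/region_start/region_end pass by two
-- staged passes: first the list of cut indices where the last component changes between sorted
-- neighbours, then one region per consecutive cut pair, read off the genes at its two ends
-- (objective: simpler). Equivalence is about the RETURN value: A also mutates its argument
-- (sort + sentinel append), B only sorts it in place.

-- ===== PORT A =====
-- A's sentinel (None,...,None) is modelled by `none` in a list of Option genes;
-- gene[-1] on the sentinel is Python's None, modelled as `none : Option String`.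
def pvLastA (g : Option (Int × Int × Int × Int × String × String)) : Option String :=
  g.map (fun x => x.2.2.2.2.2)

def convert_genes_to_regions (genes : List (Int × Int × Int × Int × String × String)) : List (Int × Int × Int × Int × String × String) :=
  let sortedGenes := PySem.List.sorted genes (key := fun x => x.1)
  let gs : List (Option (Int × Int × Int × Int × String × String)) := sortedGenes.map some ++ [none]
  match gs with
  | [] => []  -- unreachable: gs always ends with the sentinel
  | g0 :: rest =>
    -- state = (regions, previous_gene, region_start, region_end); field reads on the
    -- sentinel use .getD defaults exactly where Python never observes the value
    let st := rest.foldl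
      (fun (s : List (Int × Int × Int × Int × String × String) ×
             Option (Int × Int × Int × Int × String × String) × Int × Int) gene =>
        let regions := s.1; let prev := s.2.1; let rstart := s.2.2.1; let rend := s.2.2.2
        if pvLastA prev ≠ pvLastA gene then
          let p := prev.getD (0, 0, 0, 0, "", "")  -- prev is a real gene on every reachable emission
          let se : Int × Int := if pvLastA prev = some "(-)" then (rend, rstart) else (rstart, rend)
          ((regions ++ [(se.1, se.2, p.2.2.1, p.2.2.2.1, p.2.2.2.2.1, p.2.2.2.2.2)]),
            gene, (gene.map (fun x => x.1)).getD 0, (gene.map (fun x => x.2.1)).getD 0)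
        else
          (regions, gene, rstart, (gene.map (fun x => x.2.1)).getD 0))
      ([], g0, (g0.map (fun x => x.1)).getD 0, (g0.map (fun x => x.2.1)).getD 0)
    st.1

-- ===== PORT B =====
def pvKey (g : Int × Int × Int × Int × String × String) : String := g.2.2.2.2.2

def pvD0 : Int × Int × Int × Int × String × String := (0, 0, 0, 0, "", "")

-- Source B's `genes[i]` reads are always in range, so they are ported with `.getD`;
-- `range(1, n)` is `List.range' 1 (n-1)`, `zip(cuts, cuts[1:])` is `cuts.zip cuts.tail`
def convert_genes_to_regions_alt (genes : List (Int × Int × Int × Int × String × String)) : List (Int × Int × Int × Int × String × String) :=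
  let s := PySem.List.sorted genes (key := fun x => x.1)
  if s.isEmpty then []
  else
    let n := s.length
    let cuts : List Nat :=
      0 :: ((List.range' 1 (n - 1)).filter
        (fun i => decide (pvKey (s.getD i pvD0) ≠ pvKey (s.getD (i - 1) pvD0)))) ++ [n]
    (cuts.zip cuts.tail).map (fun p =>
      let first := s.getD p.1 pvD0
      let last := s.getD (p.2 - 1) pvD0
      let se : Int × Int := if pvKey first = "(-)" then (last.2.1, first.1) else (first.1, last.2.1)
      (se.1, se.2, last.2.2.1, last.2.2.2.1, last.2.2.2.2.1, last.2.2.2.2.2))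

-- ===== PRECONDITION & SPEC =====
def Spec_convert_genes_to_regions (genes : List (Int × Int × Int × Int × String × String)) (out : List (Int × Int × Int × Int × String × String)) : Prop := out = convert_genes_to_regions_alt genes
instance (genes : List (Int × Int × Int × Int × String × String)) (out : List (Int × Int × Int × Int × String × String)) : Decidable (Spec_convert_genes_to_regions genes out) := by unfold Spec_convert_genes_to_regions; infer_instance

-- ===== CLAIM (what is proved, stated in full; the proofs are below) =====
def Claim_equal_convert_genes_to_regions : Prop := ∀ (genes : List (Int × Int × Int × Int × String × String)), Dom_convert_genes_to_regions genes → Spec_convert_genes_to_regions genes (convert_genes_to_regions genes)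

-- ===== LEMMAS AND PROOFS =====
-- Both ports are proved equal to the same run-splitting recursion `pvRuns` on the sorted list.

def pvMk (rstart : Int) (p : Int × Int × Int × Int × String × String) : Int × Int × Int × Int × String × String :=
  let se : Int × Int := if pvKey p = "(-)" then (p.2.1, rstart) else (rstart, p.2.1)
  (se.1, se.2, p.2.2.1, p.2.2.2.1, p.2.2.2.2.1, p.2.2.2.2.2)

def pvRunsGo : Nat → List (Int × Int × Int × Int × String × String) → List (Int × Int × Int × Int × String × String)
  | _, [] => []
  | 0, _ :: _ => []
  | fuel + 1, g :: rest =>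
    let key := g.2.2.2.2.2
    let run := g :: rest.takeWhile (fun h => h.2.2.2.2.2 = key)
    let lastg := run.getLastD g
    let se : Int × Int := if key = "(-)" then (lastg.2.1, g.1) else (g.1, lastg.2.1)
    (se.1, se.2, lastg.2.2.1, lastg.2.2.2.1, lastg.2.2.2.2.1, lastg.2.2.2.2.2) ::
      pvRunsGo fuel (rest.dropWhile (fun h => h.2.2.2.2.2 = key))

def pvRuns (l : List (Int × Int × Int × Int × String × String)) : List (Int × Int × Int × Int × String × String) :=
  pvRunsGo l.length l

-- "finish the current run (started at rstart, last gene p) over M, then the remaining runs"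
def pvAgree (rstart : Int) (p : Int × Int × Int × Int × String × String) :
    List (Int × Int × Int × Int × String × String) → List (Int × Int × Int × Int × String × String)
  | [] => [pvMk rstart p]
  | g :: rest => if pvKey g = pvKey p then pvAgree rstart g rest
                 else pvMk rstart p :: pvAgree g.1 g rest

-- A's fold step (as written in the port)
def pvStepA (s : List (Int × Int × Int × Int × String × String) ×
      Option (Int × Int × Int × Int × String × String) × Int × Int)
    (gene : Option (Int × Int × Int × Int × String × String)) :
    List (Int × Int × Int × Int × String × String) ×
      Option (Int × Int × Int × Int × String × String) × Int × Int :=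
  let regions := s.1; let prev := s.2.1; let rstart := s.2.2.1; let rend := s.2.2.2
  if pvLastA prev ≠ pvLastA gene then
    let p := prev.getD (0, 0, 0, 0, "", "")
    let se : Int × Int := if pvLastA prev = some "(-)" then (rend, rstart) else (rstart, rend)
    ((regions ++ [(se.1, se.2, p.2.2.1, p.2.2.2.1, p.2.2.2.2.1, p.2.2.2.2.2)]),
      gene, (gene.map (fun x => x.1)).getD 0, (gene.map (fun x => x.2.1)).getD 0)
  else
    (regions, gene, rstart, (gene.map (fun x => x.2.1)).getD 0)

lemma pvFoldA_eq_agree (M : List (Int × Int × Int × Int × String × String))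
    (acc : List (Int × Int × Int × Int × String × String))
    (p : Int × Int × Int × Int × String × String) (rstart : Int) :
    ((M.map some ++ [none]).foldl pvStepA (acc, some p, rstart, p.2.1)).1
      = acc ++ pvAgree rstart p M := by
  induction M generalizing acc p rstart with
  | nil =>
      simp [pvStepA, pvAgree, pvMk, pvLastA, pvKey]
      exact ⟨rfl, rfl⟩
  | cons g rest ih =>
      by_cases h : pvKey g = pvKey p
      · have : pvStepA (acc, some p, rstart, p.2.1) (some g) = (acc, some g, rstart, g.2.1) := by
          simp [pvStepA, pvLastA, pvKey] at h ⊢; simp [h]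
        simp only [List.map_cons, List.cons_append, List.foldl_cons, this, ih, pvAgree, h, if_pos]
      · have : pvStepA (acc, some p, rstart, p.2.1) (some g)
            = (acc ++ [pvMk rstart p], some g, g.1, g.2.1) := by
          simp [pvStepA, pvLastA, pvMk, pvKey] at h ⊢
          rw [if_neg (fun hc => h hc.symm)]
          rfl
        simp only [List.map_cons, List.cons_append, List.foldl_cons, this, ih, pvAgree, h,
          List.append_assoc]
        simp

lemma pvKey_getLastD_all (l : List (Int × Int × Int × Int × String × String))
    (d : Int × Int × Int × Int × String × String) (k : String)
    (hl : ∀ x ∈ l, pvKey x = k) (hd : pvKey d = k) : pvKey (l.getLastD d) = k := by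
  induction l generalizing d with
  | nil => simpa using hd
  | cons a t ih =>
      rw [List.getLastD_cons]
      exact ih a (fun x hx => hl x (List.mem_cons_of_mem _ hx)) (hl a (by simp))

lemma pvKey_getLastD_takeWhile (rest : List (Int × Int × Int × Int × String × String))
    (g : Int × Int × Int × Int × String × String) :
    pvKey ((rest.takeWhile (fun h => h.2.2.2.2.2 = pvKey g)).getLastD g) = pvKey g := by
  refine pvKey_getLastD_all _ _ _ (fun x hx => ?_) rfl
  have := List.mem_takeWhile_imp hx
  simpa [pvKey] using this

lemma pvRunsGo_fuel : ∀ (f : Nat) (l : List (Int × Int × Int × Int × String × String)),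
    l.length ≤ f → pvRunsGo f l = pvRunsGo l.length l := by
  intro f
  induction f using Nat.strong_induction_on with
  | _ f ih =>
    intro l hl
    cases l with
    | nil => cases f <;> rfl
    | cons g rest =>
        cases f with
        | zero => simp at hl
        | succ f =>
            simp only [List.length_cons, pvRunsGo]
            have hd := List.length_dropWhile_le
              (p := fun h : Int × Int × Int × Int × String × String =>
                decide (h.2.2.2.2.2 = g.2.2.2.2.2)) (l := rest)
            have h1 : rest.length ≤ f := Nat.le_of_succ_le_succ hl
            rw [ih f (Nat.lt_succ_self f) _ (le_trans hd h1),
                ih rest.length (Nat.lt_succ_of_le h1) _ hd]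

lemma pvRuns_cons (g : Int × Int × Int × Int × String × String)
    (rest : List (Int × Int × Int × Int × String × String)) :
    pvRuns (g :: rest)
      = pvMk g.1 ((rest.takeWhile (fun h => h.2.2.2.2.2 = pvKey g)).getLastD g)
        :: pvRuns (rest.dropWhile (fun h => h.2.2.2.2.2 = pvKey g)) := by
  have hk := pvKey_getLastD_takeWhile rest g
  unfold pvRuns
  simp only [List.length_cons, pvRunsGo]
  rw [pvRunsGo_fuel rest.length _ (List.length_dropWhile_le _ _)]
  simp only [List.getLastD_cons]
  unfold pvMk
  rw [hk]
  rfl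

lemma pvAgree_eq_runs (M : List (Int × Int × Int × Int × String × String))
    (p : Int × Int × Int × Int × String × String) (rstart : Int) :
    pvAgree rstart p M
      = pvMk rstart ((M.takeWhile (fun h => h.2.2.2.2.2 = pvKey p)).getLastD p)
        :: pvRuns (M.dropWhile (fun h => h.2.2.2.2.2 = pvKey p)) := by
  induction M generalizing p rstart with
  | nil => simp [pvAgree, pvRuns, pvRunsGo]
  | cons g rest ih =>
      by_cases h : pvKey g = pvKey p
      · have hpred : (fun h : Int × Int × Int × Int × String × String =>
            decide (h.2.2.2.2.2 = pvKey p)) = (fun h => decide (h.2.2.2.2.2 = pvKey g)) := by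
          funext x; simp [h]
        simp only [pvAgree, h, if_pos]
        rw [ih g rstart]
        have hself : decide (g.2.2.2.2.2 = pvKey g) = true := by simp [pvKey]
        have hgb : decide (g.2.2.2.2.2 = pvKey p) = true := by simpa [pvKey] using h
        simp only [List.takeWhile_cons, List.dropWhile_cons, hself, if_true, List.getLastD_cons, hpred]
      · have hg : (decide (g.2.2.2.2.2 = pvKey p)) = false := by
          simpa [pvKey] using h
        simp only [pvAgree, h, if_neg, not_false_iff]
        rw [ih g g.1]
        simp [hg, pvRuns_cons]

-- ---- B side: the cuts map equals pvRuns ----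

def pvCutPred (s : List (Int × Int × Int × Int × String × String)) (i : Nat) : Bool :=
  decide (pvKey (s.getD i pvD0) ≠ pvKey (s.getD (i - 1) pvD0))

def pvCuts (s : List (Int × Int × Int × Int × String × String)) : List Nat :=
  0 :: ((List.range' 1 (s.length - 1)).filter (pvCutPred s)) ++ [s.length]

def pvEmit (s : List (Int × Int × Int × Int × String × String)) (p : Nat × Nat) :
    Int × Int × Int × Int × String × String :=
  let first := s.getD p.1 pvD0
  let last := s.getD (p.2 - 1) pvD0
  let se : Int × Int := if pvKey first = "(-)" then (last.2.1, first.1) else (first.1, last.2.1)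
  (se.1, se.2, last.2.2.1, last.2.2.2.1, last.2.2.2.2.1, last.2.2.2.2.2)

def pvCutsMap (s : List (Int × Int × Int × Int × String × String)) :
    List (Int × Int × Int × Int × String × String) :=
  ((pvCuts s).zip (pvCuts s).tail).map (pvEmit s)

lemma pvGetD_shift (t dr : List (Int × Int × Int × Int × String × String)) (j : Nat)
    (d : Int × Int × Int × Int × String × String) :
    (t ++ dr).getD (t.length + j) d = dr.getD j d := by
  induction t with
  | nil => simp
  | cons a t ih => simpa [Nat.succ_add] using ih

lemma pvRunKey (g : Int × Int × Int × Int × String × String)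
    (t dr : List (Int × Int × Int × Int × String × String))
    (ht : ∀ x ∈ t, pvKey x = pvKey g) (i : Nat) (hi : i ≤ t.length) :
    pvKey ((g :: (t ++ dr)).getD i pvD0) = pvKey g := by
  cases i with
  | zero => simp
  | succ m =>
      have hm : m < t.length := Nat.lt_of_succ_le hi
      have h1 : (g :: (t ++ dr)).getD (m + 1) pvD0 = t.getD m pvD0 := by
        simp [List.getD, List.getElem?_append_left hm]
      rw [h1]
      have h2 : t.getD m pvD0 = t[m] := by simp [List.getD, List.getElem?_eq_getElem hm]
      rw [h2]
      exact ht _ (List.getElem_mem hm)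

lemma pvRunLast (g : Int × Int × Int × Int × String × String)
    (t dr : List (Int × Int × Int × Int × String × String)) :
    (g :: (t ++ dr)).getD t.length pvD0 = t.getLastD g := by
  induction t generalizing g with
  | nil => simp
  | cons a t ih =>
      rw [List.getLastD_cons]
      simpa using ih a

lemma pvCutPred_run (g : Int × Int × Int × Int × String × String)
    (t dr : List (Int × Int × Int × Int × String × String))
    (ht : ∀ x ∈ t, pvKey x = pvKey g) (i : Nat) (h2 : i ≤ t.length) :
    pvCutPred (g :: (t ++ dr)) i = false := by
  unfold pvCutPred
  rw [pvRunKey g t dr ht i h2, pvRunKey g t dr ht (i - 1) (le_trans (Nat.sub_le _ _) h2)]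
  simp

lemma pvCuts_nodrop (g : Int × Int × Int × Int × String × String)
    (t : List (Int × Int × Int × Int × String × String))
    (ht : ∀ x ∈ t, pvKey x = pvKey g) :
    pvCuts (g :: t) = [0, t.length + 1] := by
  unfold pvCuts
  have hf : (List.range' 1 ((g :: t).length - 1)).filter (pvCutPred (g :: t)) = [] := by
    rw [List.filter_eq_nil_iff]
    intro i hi
    have hm := (List.mem_range'_1).1 hi
    have : pvCutPred (g :: (t ++ [])) i = false := by
      refine pvCutPred_run g t [] ht i ?_
      have := hm.2; simp at this; omega
    simp only [List.append_nil] at this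
    simp [this]
  rw [hf]
  simp

lemma pvCutPred_shift (g : Int × Int × Int × Int × String × String)
    (t dr : List (Int × Int × Int × Int × String × String)) (i : Nat) (hi : 1 ≤ i) :
    pvCutPred (g :: (t ++ dr)) (t.length + 1 + i) = pvCutPred dr i := by
  unfold pvCutPred
  have e1 : t.length + 1 + i = (t.length + i) + 1 := by omega
  have e2 : t.length + 1 + i - 1 = (t.length + (i - 1)) + 1 := by omega
  rw [e1]
  have g1 : (g :: (t ++ dr)).getD ((t.length + i) + 1) pvD0 = dr.getD i pvD0 := by
    rw [List.getD_cons_succ, pvGetD_shift]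
  have g2 : (g :: (t ++ dr)).getD ((t.length + i) + 1 - 1) pvD0 = dr.getD (i - 1) pvD0 := by
    have : (t.length + i) + 1 - 1 = (t.length + (i - 1)) + 1 := by omega
    rw [this, List.getD_cons_succ, pvGetD_shift]
  rw [g1, g2]

lemma pvCuts_drop (g d : Int × Int × Int × Int × String × String)
    (t dr' : List (Int × Int × Int × Int × String × String))
    (ht : ∀ x ∈ t, pvKey x = pvKey g) (hd : pvKey d ≠ pvKey g) :
    pvCuts (g :: (t ++ d :: dr')) = 0 :: (pvCuts (d :: dr')).map (· + (t.length + 1)) := by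
  unfold pvCuts
  have hlen : (g :: (t ++ d :: dr')).length - 1 = t.length + (dr'.length + 1) := by
    simp
  rw [hlen]
  have hsplit : List.range' 1 (t.length + (dr'.length + 1))
      = List.range' 1 t.length ++ List.range' (1 + t.length) (dr'.length + 1) := by
    rw [← List.range'_append]; simp
  rw [hsplit, List.filter_append]
  have hf1 : (List.range' 1 t.length).filter (pvCutPred (g :: (t ++ d :: dr'))) = [] := by
    rw [List.filter_eq_nil_iff]
    intro i hi
    have hm := (List.mem_range'_1).1 hi
    have : pvCutPred (g :: (t ++ d :: dr')) i = false := pvCutPred_run g t _ ht i (by omega)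
    simp [this]
  rw [hf1]
  rw [List.range'_succ, List.filter_cons]
  have hr : pvCutPred (g :: (t ++ d :: dr')) (1 + t.length) = true := by
    unfold pvCutPred
    have e1 : 1 + t.length = t.length + 1 := by omega
    have g1 : (g :: (t ++ d :: dr')).getD (t.length + 1) pvD0 = d := by
      rw [List.getD_cons_succ]
      have := pvGetD_shift t (d :: dr') 0 pvD0
      simpa using this
    have g2 : (g :: (t ++ d :: dr')).getD (t.length + 1 - 1) pvD0 = t.getLastD g := by
      simpa using pvRunLast g t (d :: dr')
    rw [e1, g1, g2]
    have hk : pvKey (t.getLastD g) = pvKey g := pvKey_getLastD_all t g (pvKey g) ht rfl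
    rw [hk]
    simp [hd]
  rw [hr]
  simp only [if_true]
  have hmap : List.range' (1 + t.length + 1) dr'.length
      = (List.range' 1 dr'.length).map (fun x => (t.length + 1) + x) := by
    rw [List.map_add_range']
    congr 1; omega
  rw [hmap, List.filter_map]
  have hcong : (List.range' 1 dr'.length).filter
        (pvCutPred (g :: (t ++ d :: dr')) ∘ fun x => (t.length + 1) + x)
      = (List.range' 1 dr'.length).filter (pvCutPred (d :: dr')) := by
    apply List.filter_congr
    intro i hi
    have hm := (List.mem_range'_1).1 hi
    simpa using pvCutPred_shift g t (d :: dr') i hm.1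
  rw [hcong]
  have hlen2 : (g :: (t ++ d :: dr')).length = (dr'.length + 1) + (t.length + 1) := by
    simp; omega
  rw [hlen2]
  simp only [List.map_cons, List.map_append]
  have hl1 : ((d :: dr').length - 1) = dr'.length := by simp
  rw [hl1]
  simp only [List.nil_append, List.cons_append]
  have hA : List.map (fun x => t.length + 1 + x)
        (List.filter (pvCutPred (d :: dr')) (List.range' 1 dr'.length))
      = List.map (fun x => x + (t.length + 1))
        (List.filter (pvCutPred (d :: dr')) (List.range' 1 dr'.length)) :=
    List.map_congr_left (fun a _ => Nat.add_comm _ _)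
  rw [hA]
  have h1 : 1 + t.length = 0 + (t.length + 1) := by omega
  rw [h1]
  simp

lemma pvEmit_run (g : Int × Int × Int × Int × String × String)
    (t dr : List (Int × Int × Int × Int × String × String))
    (ht : ∀ x ∈ t, pvKey x = pvKey g) :
    pvEmit (g :: (t ++ dr)) (0, t.length + 1) = pvMk g.1 (t.getLastD g) := by
  unfold pvEmit pvMk
  have g1 : (g :: (t ++ dr)).getD 0 pvD0 = g := by simp
  have g2 : (g :: (t ++ dr)).getD (t.length + 1 - 1) pvD0 = t.getLastD g := by
    simpa using pvRunLast g t dr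
  rw [g1, g2, pvKey_getLastD_all t g (pvKey g) ht rfl]

lemma pvEmit_shift (g : Int × Int × Int × Int × String × String)
    (t dr : List (Int × Int × Int × Int × String × String)) (p : Nat × Nat) (hp : 1 ≤ p.2) :
    pvEmit (g :: (t ++ dr)) (p.1 + (t.length + 1), p.2 + (t.length + 1)) = pvEmit dr p := by
  unfold pvEmit
  have g1 : (g :: (t ++ dr)).getD (p.1 + (t.length + 1)) pvD0 = dr.getD p.1 pvD0 := by
    have e : p.1 + (t.length + 1) = (t.length + p.1) + 1 := by omega
    rw [e, List.getD_cons_succ, pvGetD_shift]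
  have g2 : (g :: (t ++ dr)).getD (p.2 + (t.length + 1) - 1) pvD0 = dr.getD (p.2 - 1) pvD0 := by
    have e : p.2 + (t.length + 1) - 1 = (t.length + (p.2 - 1)) + 1 := by omega
    rw [e, List.getD_cons_succ, pvGetD_shift]
  rw [g1, g2]

lemma pvCuts_tail_pos (l : List (Int × Int × Int × Int × String × String)) (hne : l ≠ [])
    (p : Nat × Nat) (hp : p ∈ (pvCuts l).zip (pvCuts l).tail) : 1 ≤ p.2 := by
  obtain ⟨a, b⟩ := p
  have hb := (List.of_mem_zip hp).2
  unfold pvCuts at hb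
  simp only [List.cons_append, List.tail_cons] at hb
  rcases List.mem_append.1 hb with h | h
  · have := (List.mem_range'_1).1 (List.mem_of_mem_filter h)
    omega
  · simp at h
    subst h
    cases l with
    | nil => exact absurd rfl hne
    | cons x xs => simp
  
theorem pvCutsMap_eq_runs : ∀ (fuel : Nat) (s : List (Int × Int × Int × Int × String × String)),
    s.length ≤ fuel → s ≠ [] → pvCutsMap s = pvRuns s := by
  intro fuel
  induction fuel with
  | zero => intro s hs hne; cases s with
      | nil => exact absurd rfl hne
      | cons a b => simp at hs
  | succ fuel ih =>
    intro s hs hne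
    cases s with
    | nil => exact absurd rfl hne
    | cons g rest =>
      set t := rest.takeWhile (fun h => decide (h.2.2.2.2.2 = pvKey g)) with hT
      set dr := rest.dropWhile (fun h => decide (h.2.2.2.2.2 = pvKey g)) with hD
      have ht : ∀ x ∈ t, pvKey x = pvKey g := by
        intro x hx
        rw [hT] at hx
        have := List.mem_takeWhile_imp hx
        simpa [pvKey] using this
      have hruns : pvRuns (g :: rest) = pvMk g.1 (t.getLastD g) :: pvRuns dr := by
        have := pvRuns_cons g rest
        simpa [← hT, ← hD, pvKey] using this
      have hsplit : t ++ dr = rest := by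
        rw [hT, hD]; exact List.takeWhile_append_dropWhile
      clear_value t dr
      subst hsplit
      rw [hruns]
      cases hdr : dr with
      | nil =>
        subst hdr
        simp only [List.append_nil]
        unfold pvCutsMap
        rw [pvCuts_nodrop g t ht]
        simp only [List.zip_cons_cons, List.tail_cons, List.zip_nil_right, List.map_cons,
          List.map_nil]
        have he : pvEmit (g :: t) (0, t.length + 1) = pvMk g.1 (t.getLastD g) := by
          have := pvEmit_run g t [] ht
          simpa using this
        rw [he]
        rfl
      | cons d dr' =>
        have hd : pvKey d ≠ pvKey g := by
          have w : (t ++ dr).dropWhile (fun h => decide (h.2.2.2.2.2 = pvKey g)) ≠ [] := by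
            rw [← hD, hdr]
            simp
          have hcons : (t ++ dr).dropWhile
              (fun h : Int × Int × Int × Int × String × String => decide (h.2.2.2.2.2 = pvKey g))
              = d :: dr' := hD.symm.trans hdr
          have h2 := List.head_dropWhile_not
            (p := fun h : Int × Int × Int × Int × String × String => decide (h.2.2.2.2.2 = pvKey g))
            (l := t ++ dr) w
          simp [hcons] at h2
          simpa [pvKey] using h2
        subst hdr
        unfold pvCutsMap
        rw [pvCuts_drop g d t dr' ht hd]
        have hcd : pvCuts (d :: dr')
            = 0 :: (((List.range' 1 ((d :: dr').length - 1)).filter (pvCutPred (d :: dr'))) ++ [(d :: dr').length]) := by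
          unfold pvCuts; rfl
        set X := ((List.range' 1 ((d :: dr').length - 1)).filter (pvCutPred (d :: dr'))) ++ [(d :: dr').length] with hX
        have hmapc : (pvCuts (d :: dr')).map (· + (t.length + 1))
            = (t.length + 1) :: X.map (· + (t.length + 1)) := by
          rw [hcd]; simp
        rw [hmapc]
        simp only [List.tail_cons, List.zip_cons_cons, List.map_cons]
        have hzip : ((t.length + 1) :: X.map (· + (t.length + 1))).zip (X.map (· + (t.length + 1)))
            = ((pvCuts (d :: dr')).zip (pvCuts (d :: dr')).tail).map
                (Prod.map (· + (t.length + 1)) (· + (t.length + 1))) := by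
          rw [hcd]
          simp only [List.tail_cons, ← List.zip_map]
          simp
        rw [hzip, List.map_map]
        have hmm : (((pvCuts (d :: dr')).zip (pvCuts (d :: dr')).tail).map
              (pvEmit (g :: (t ++ d :: dr')) ∘ Prod.map (· + (t.length + 1)) (· + (t.length + 1))))
            = ((pvCuts (d :: dr')).zip (pvCuts (d :: dr')).tail).map (pvEmit (d :: dr')) := by
          apply List.map_congr_left
          intro p hp
          have hp2 : 1 ≤ p.2 := pvCuts_tail_pos (d :: dr') (by simp) p hp
          have := pvEmit_shift g t (d :: dr') p hp2
          simpa [Prod.map] using this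
        rw [hmm, pvEmit_run g t (d :: dr') ht]
        have hlt : (d :: dr').length ≤ fuel := by
          simp only [List.length_cons, List.length_append] at hs ⊢
          omega
        have hih := ih (d :: dr') hlt (by simp)
        unfold pvCutsMap at hih
        rw [hih]

theorem pvCutsMap_eq_runs' (s : List (Int × Int × Int × Int × String × String)) (hne : s ≠ []) :
    pvCutsMap s = pvRuns s := pvCutsMap_eq_runs s.length s le_rfl hne

-- ===== VERDICT (by name: the statement is the Claim_ definition above) =====
theorem convert_genes_to_regions_spec : Claim_equal_convert_genes_to_regions := by
  intro genes _
  show convert_genes_to_regions genes = convert_genes_to_regions_alt genes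
  unfold convert_genes_to_regions convert_genes_to_regions_alt
  cases hs : PySem.List.sorted genes (key := fun x => x.1) with
  | nil => decide
  | cons g rest =>
      show (List.foldl pvStepA ([], some g, g.1, g.2.1) (rest.map some ++ [none])).1
            = if (g :: rest).isEmpty then [] else pvCutsMap (g :: rest)
      rw [pvFoldA_eq_agree rest [] g g.1, List.nil_append, pvAgree_eq_runs,
          pvCutsMap_eq_runs' _ (by simp), pvRuns_cons]
      simp
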